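-- pv_equiv track=rewrite | github.com/Suanec/slcs | slcs/src/python/suanec/slcs/array_string/1051_height_checker.py | heightChecker_count_sort
-- ===== SOURCE A (Python) =====
-- def heightChecker_count_sort(heights):
--     """
--     Runtime: 16 ms, faster than 96.51% of Python online submissions for Height Checker.
--     Memory Usage: 13.5 MB, less than 40.86% of Python online submissions for Height Checker.
--     :type heights: List[int]
--     :rtype: int
--     """
--     freq_height = [0] * 101
--     for height in heights:
--         freq_height[height] += 1
--     result = 0
--     freq_point = 0
--
--     for height in heights:
--         while (freq_height[freq_point] == 0):
--             freq_point += 1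
--
--         if(freq_height[freq_point] > 0):
--             if(height != freq_point):
--                 result += 1
--             freq_height[freq_point] -= 1
--     return result
-- ===== SOURCE B (Python) =====
-- def heightChecker_count_sort(heights):
--     cnt = [0] * 101
--     for h in heights:
--         cnt[h] += 1
--     expected = [i for i in range(101) for _ in range(cnt[i])]
--     return sum(1 for a, b in zip(heights, expected) if a != b)
-- ===== Notes on version B (the rewrite author's own statement) =====
-- stated objective: simpler
-- what changed: B drops A's stateful pointer walk (while-advance over the table with per-element decrements and a moving freq_point) and instead materializes the counting-sorted expected array with one comprehension, then counts mismatches with zip; only the one-line table build is shared.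
import Mathlib
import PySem

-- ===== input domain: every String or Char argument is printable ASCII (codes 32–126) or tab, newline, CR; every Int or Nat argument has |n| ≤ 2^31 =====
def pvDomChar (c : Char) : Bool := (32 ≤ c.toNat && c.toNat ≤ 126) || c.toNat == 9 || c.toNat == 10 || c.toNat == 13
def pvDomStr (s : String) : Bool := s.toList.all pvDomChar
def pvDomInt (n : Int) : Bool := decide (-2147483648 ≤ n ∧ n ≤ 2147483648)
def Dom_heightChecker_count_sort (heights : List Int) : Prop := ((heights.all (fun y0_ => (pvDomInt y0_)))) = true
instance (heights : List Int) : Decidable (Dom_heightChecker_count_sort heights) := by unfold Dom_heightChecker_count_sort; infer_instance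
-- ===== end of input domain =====

-- B drops A's while-advancing pointer walk over the frequency table in favour of materializing
-- the counting-sorted expected array and counting mismatches with zip (simpler, not faster).

-- ===== PORT A =====
-- the 'while freq_height[freq_point] == 0: freq_point += 1' loop, as structural recursion on the
-- remaining table length (the fuel only makes the recursion total; inside Pre_ it never runs out —
-- out-of-table access is where Python raises IndexError, excluded by Pre_)
def hcAdvanceFuel (freq : List Int) (p fuel : Nat) : Nat :=
  match fuel with
  | 0 => p
  | fuel + 1 => if PySem.List.pyGetD freq (p : Int) 0 = 0 then hcAdvanceFuel freq (p + 1) fuel else p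

def hcAdvance (freq : List Int) (p : Nat) : Nat := hcAdvanceFuel freq p (freq.length - p)

def heightChecker_count_sort (heights : List Int) : Int :=
  let freq0 : List Int := List.replicate 101 0
  let freq := heights.foldl (fun f h => PySem.List.pySetD f h (PySem.List.pyGetD f h 0 + 1)) freq0
  let st := heights.foldl (fun (st : List Int × Nat × Int) h =>
      let f := st.1
      let p := hcAdvance f st.2.1
      let r := st.2.2
      if PySem.List.pyGetD f (p : Int) 0 > 0 then
        (PySem.List.pySetD f (p : Int) (PySem.List.pyGetD f (p : Int) 0 - 1), p,
         if h ≠ (p : Int) then r + 1 else r)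
      else (f, p, r)) (freq, 0, 0)
  st.2.2

-- ===== PORT B =====
def heightChecker_count_sort_alt (heights : List Int) : Int :=
  let cnt0 : List Int := List.replicate 101 0
  let cnt := heights.foldl (fun f h => PySem.List.pySetD f h (PySem.List.pyGetD f h 0 + 1)) cnt0
  let expected : List Int := (PySem.List.pyRange 0 101 1).flatMap
      (fun i => (PySem.List.pyRange 0 (PySem.List.pyGetD cnt i 0) 1).map (fun _ => i))
  ((heights.zip expected).countP (fun ab => ab.1 != ab.2) : Nat)

-- ===== PRECONDITION & SPEC =====
-- Pre_ is exactly the inputs on which A returns: every height must index the 101-entry frequency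
-- table without IndexError, i.e. lie in -101..100 (Python's negative indices wrap from the end).
def Pre_heightChecker_count_sort (heights : List Int) : Prop :=
  ∀ h ∈ heights, -101 ≤ h ∧ h ≤ 100
instance (heights : List Int) : Decidable (Pre_heightChecker_count_sort heights) := by
  unfold Pre_heightChecker_count_sort; infer_instance
def pvWitness_heightChecker_count_sort : List Int := [1, 0, 100, 2, 2]

def Spec_heightChecker_count_sort (heights : List Int) (out : Int) : Prop :=
  out = heightChecker_count_sort_alt heights
instance (heights : List Int) (out : Int) : Decidable (Spec_heightChecker_count_sort heights out) := by
  unfold Spec_heightChecker_count_sort; infer_instance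

-- ===== CLAIM (what is proved, stated in full; the proofs are below) =====
def Claim_equal_heightChecker_count_sort : Prop := ∀ (heights : List Int), Dom_heightChecker_count_sort heights → Pre_heightChecker_count_sort heights → Spec_heightChecker_count_sort heights (heightChecker_count_sort heights)

-- ===== LEMMAS AND PROOFS =====

def wrapIdx (h : Int) : Nat := (if h < 0 then h + 101 else h).toNat

theorem pyGetD_wrap (f : List Int) (h : Int) (d : Int) (hf : f.length = 101)
    (hlo : -101 ≤ h) (hhi : h ≤ 100) :
    PySem.List.pyGetD f h d = f.getD (wrapIdx h) d := by
  simp only [PySem.List.pyGetD, PySem.List.pyGet?, PySem.List.pyIdx?, hf, wrapIdx]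
  split_ifs with h1 h2 h3 <;> try omega
  · simp [List.getD_eq_getElem?_getD]
  · have : 101 - (-h).toNat = (h + 101).toNat := by omega
    simp [this, List.getD_eq_getElem?_getD]

theorem pySetD_wrap (f : List Int) (h : Int) (v : Int) (hf : f.length = 101)
    (hlo : -101 ≤ h) (hhi : h ≤ 100) :
    PySem.List.pySetD f h v = f.set (wrapIdx h) v := by
  simp only [PySem.List.pySetD, PySem.List.pySet?, PySem.List.pyIdx?, hf, wrapIdx]
  split_ifs with h1 h2 h3 <;> try omega
  · simp
  · have : 101 - (-h).toNat = (h + 101).toNat := by omega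
    simp [this]

theorem hc_build_len (hs : List Int) (f : List Int) :
    (hs.foldl (fun f h => PySem.List.pySetD f h (PySem.List.pyGetD f h 0 + 1)) f).length
      = f.length := by
  induction hs generalizing f with
  | nil => rfl
  | cons h hs ih => simp [List.foldl_cons, ih, PySem.List.length_pySetD]

theorem wrapIdx_lt (h : Int) (hlo : -101 ≤ h) (hhi : h ≤ 100) : wrapIdx h < 101 := by
  unfold wrapIdx; split <;> omega

theorem hc_build (hs : List Int) (f : List Int) (q : Nat)
    (hq : q < 101) (hf : f.length = 101) (hin : ∀ h ∈ hs, -101 ≤ h ∧ h ≤ 100) :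
    (hs.foldl (fun f h => PySem.List.pySetD f h (PySem.List.pyGetD f h 0 + 1)) f).getD q 0
      = f.getD q 0 + (hs.countP (fun h => wrapIdx h == q) : Int) := by
  induction hs generalizing f with
  | nil => simp
  | cons h hs ih =>
    obtain ⟨h0, h100⟩ := hin h (by simp)
    have hset : PySem.List.pySetD f h (PySem.List.pyGetD f h 0 + 1)
        = f.set (wrapIdx h) (f.getD (wrapIdx h) 0 + 1) := by
      rw [pySetD_wrap f h _ hf h0 h100, pyGetD_wrap f h 0 hf h0 h100]
    have hwlt : wrapIdx h < 101 := wrapIdx_lt h h0 h100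
    simp only [List.foldl_cons]
    rw [ih _ (by rw [hset]; simp [hf]) (fun x hx => hin x (by simp [hx]))]
    rw [hset, List.countP_cons]
    by_cases hqh : q = wrapIdx h
    · subst hqh
      rw [List.getD_eq_getElem?_getD, List.getElem?_set_self (by omega)]
      simp [List.getD_eq_getElem?_getD]
      ring
    · rw [List.getD_eq_getElem?_getD, List.getElem?_set_ne (by omega)]
      have hne : ¬ (wrapIdx h == q) = true := by simpa using (fun e => hqh e.symm)
      simp [hne, List.getD_eq_getElem?_getD]

def expList (g : Nat → Nat) (qs : List Nat) : List Int :=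
  qs.flatMap (fun q => List.replicate (g q) (q : Int))

theorem mem_expList (g : Nat → Nat) (qs : List Nat) (x : Int) (hx : x ∈ expList g qs) :
    ∃ p ∈ qs, x = (p : Int) := by
  unfold expList at hx
  rcases List.mem_flatMap.mp hx with ⟨p, hp, hmem⟩
  exact ⟨p, hp, (List.eq_of_mem_replicate hmem)⟩

theorem count_expList_notmem (g : Nat → Nat) (qs : List Nat) (q : Nat) (hq : q ∉ qs) :
    (expList g qs).count ((q : Nat) : Int) = 0 := by
  rw [List.count_eq_zero]
  intro hmem
  rcases mem_expList g qs _ hmem with ⟨p, hp, he⟩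
  have : p = q := by omega
  exact hq (this ▸ hp)

theorem count_expList (g : Nat → Nat) (qs : List Nat) (hnd : qs.Nodup) (q : Nat)
    (hq : q ∈ qs) : (expList g qs).count ((q : Nat) : Int) = g q := by
  induction qs with
  | nil => simp at hq
  | cons p qs ih =>
    simp only [expList] at ih ⊢
    rw [List.flatMap_cons, List.count_append]
    rcases List.mem_cons.mp hq with h | h
    · subst h
      have hnot : q ∉ qs := (List.nodup_cons.mp hnd).1
      have h0 := count_expList_notmem g qs q hnot
      simp only [expList] at h0
      rw [h0]
      simp
    · have hpq : p ≠ q := by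
        rintro rfl; exact (List.nodup_cons.mp hnd).1 h
      rw [ih (List.nodup_cons.mp hnd).2 h, List.count_replicate]
      simp [hpq]

theorem pairwise_expList (g : Nat → Nat) (qs : List Nat) (hqs : qs.Pairwise (· ≤ ·)) :
    (expList g qs).Pairwise (· ≤ ·) := by
  induction qs with
  | nil => simp [expList]
  | cons p qs ih =>
    simp only [expList] at ih ⊢
    rw [List.flatMap_cons, List.pairwise_append]
    refine ⟨List.pairwise_replicate.mpr (by simp), ih (List.pairwise_cons.mp hqs).2, ?_⟩
    intro x hx y hy
    have hxp : x = (p : Int) := List.eq_of_mem_replicate hx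
    rcases mem_expList g qs y (by simpa [expList] using hy) with ⟨r, hr, hyr⟩
    have := (List.pairwise_cons.mp hqs).1 r hr
    omega

theorem length_expList (g : Nat → Nat) (qs : List Nat) :
    (expList g qs).length = (qs.map g).sum := by
  unfold expList
  rw [List.length_flatMap]
  congr 1
  simp

theorem sum_indicator_range_zero (k n : Nat) (hk : n ≤ k) :
    ((List.range n).map (fun q => if k == q then (1:Nat) else 0)).sum = 0 := by
  induction n with
  | zero => simp
  | succ n ih =>
    rw [List.range_succ, List.map_append, List.sum_append, ih (by omega)]
    simp
    omega

theorem sum_indicator_range_one (k n : Nat) (hk : k < n) :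
    ((List.range n).map (fun q => if k == q then (1:Nat) else 0)).sum = 1 := by
  induction n with
  | zero => omega
  | succ n ih =>
    rw [List.range_succ, List.map_append, List.sum_append]
    by_cases h : k = n
    · subst h
      rw [sum_indicator_range_zero k k (le_refl k)]
      simp
    · rw [ih (by omega)]
      simp [h]

theorem sum_countP_range (hs : List Int) (hin : ∀ h ∈ hs, -101 ≤ h ∧ h ≤ 100) :
    ((List.range 101).map (fun q => hs.countP (fun h => wrapIdx h == q))).sum = hs.length := by
  induction hs with
  | nil => simp
  | cons h hs ih =>
    have hw : wrapIdx h < 101 := wrapIdx_lt h (hin h (by simp)).1 (hin h (by simp)).2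
    have hstep : ∀ q : Nat, (h :: hs).countP (fun x => wrapIdx x == q)
        = hs.countP (fun x => wrapIdx x == q) + (if wrapIdx h == q then 1 else 0) := by
      intro q; rw [List.countP_cons]
    simp only [hstep]
    rw [List.sum_map_add, ih (fun x hx => hin x (by simp [hx])),
      sum_indicator_range_one (wrapIdx h) 101 hw, List.length_cons]

theorem expected_eq (cnt : List Int) (hnn : ∀ q : Nat, q < 101 → 0 ≤ cnt.getD q 0) :
    (PySem.List.pyRange 0 101 1).flatMap
      (fun i => (PySem.List.pyRange 0 (PySem.List.pyGetD cnt i 0) 1).map (fun _ => i))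
    = expList (fun q => (cnt.getD q 0).toNat) (List.range 101) := by
  have h101 : (101 : Int) = ((101 : Nat) : Int) := by norm_num
  rw [h101, PySem.List.pyRange_zero_natCast]
  rw [List.flatMap_def, List.map_map, expList, List.flatMap_def]
  congr 1
  apply List.map_congr_left
  intro k hk
  have hk101 : k < 101 := List.mem_range.mp hk
  simp only [Function.comp]
  rw [PySem.List.pyGetD_natCast]
  have hc : cnt.getD k 0 = (((cnt.getD k 0).toNat : Nat) : Int) := by
    have := hnn k hk101
    omega
  rw [hc, PySem.List.pyRange_zero_natCast, List.map_map]
  have : ((fun _ => (k : Int)) ∘ fun q : Nat => (q : Int)) = (fun _ : Nat => (k : Int)) := rfl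
  rw [this, List.map_const']
  simp
  omega

-- The invariant tying A's loop state (freq table, pointer) to the not-yet-consumed part s of the
-- expected (counting-sorted) sequence: freq holds the multiset counts of s, everything strictly
-- below the pointer is exhausted, s is weakly increasing with values in 0..100.
def HcRel (f : List Int) (p : Nat) (s : List Int) : Prop :=
  f.length = 101 ∧
  (∀ q : Nat, q < 101 → f.getD q 0 = (s.count (q : Int) : Int)) ∧
  (∀ q : Nat, q < p → f.getD q 0 = 0) ∧
  s.Pairwise (· ≤ ·) ∧
  (∀ x ∈ s, 0 ≤ x ∧ x ≤ 100)

theorem hcAdvanceFuel_eq (f : List Int) (t : Nat) (ht : t < f.length) (hnz : f.getD t 0 ≠ 0) :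
    ∀ fuel p, p ≤ t → fuel = f.length - p →
    (∀ q : Nat, p ≤ q → q < t → f.getD q 0 = 0) → hcAdvanceFuel f p fuel = t := by
  intro fuel
  induction fuel with
  | zero => intro p hpt hfu _; omega
  | succ fuel ih =>
    intro p hpt hfu hz
    rw [hcAdvanceFuel]
    rw [PySem.List.pyGetD_natCast]
    by_cases hp : f.getD p 0 = 0
    · have hptlt : p < t := by
        rcases Nat.lt_or_ge p t with h | h
        · exact h
        · have : p = t := by omega
          exact absurd (this ▸ hp) hnz
      simp only [hp, if_true]
      exact ih (p + 1) (by omega) (by omega) (fun q hq1 hq2 => hz q (by omega) hq2)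
    · have hpt' : p = t := by
        rcases Nat.lt_or_ge p t with h | h
        · exact absurd (hz p (le_refl p) h) hp
        · omega
      subst hpt'
      rw [if_neg hp]

theorem count_eq_zero_of_lt_head (a q : Int) (s' : List Int)
    (hpw : (a :: s').Pairwise (· ≤ ·)) (hq : q < a) : (a :: s').count q = 0 := by
  rw [List.count_eq_zero]
  intro hmem
  rcases List.mem_cons.mp hmem with h | h
  · omega
  · have := (List.pairwise_cons.mp hpw).1 q h
    omega

theorem hcAdvance_eq (f : List Int) (p : Nat) (a : Int) (s' : List Int)
    (hrel : HcRel f p (a :: s')) : hcAdvance f p = a.toNat := by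
  obtain ⟨hlen, hcnt, hzero, hpw, hbd⟩ := hrel
  obtain ⟨ha0, ha100⟩ := hbd a (by simp)
  have hat : ((a.toNat : Nat) : Int) = a := by omega
  have hcnta : f.getD a.toNat 0 = ((a :: s').count a : Int) := by
    rw [hcnt a.toNat (by omega), hat]
  have hnz : f.getD a.toNat 0 ≠ 0 := by
    rw [hcnta, List.count_cons_self]
    positivity
  have hpt : p ≤ a.toNat := by
    by_contra hc
    exact hnz (hzero a.toNat (by omega))
  exact hcAdvanceFuel_eq f a.toNat (by omega) hnz _ p hpt rfl
    (fun q hq1 hq2 => by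
      rw [hcnt q (by omega), count_eq_zero_of_lt_head a (q : Int) s' hpw (by omega)]
      simp)

theorem hcRel_step (f : List Int) (p : Nat) (a : Int) (s' : List Int)
    (hrel : HcRel f p (a :: s')) :
    HcRel (PySem.List.pySetD f ((a.toNat : Nat) : Int)
      (PySem.List.pyGetD f ((a.toNat : Nat) : Int) 0 - 1)) a.toNat s' := by
  obtain ⟨hlen, hcnt, hzero, hpw, hbd⟩ := hrel
  obtain ⟨ha0, ha100⟩ := hbd a (by simp)
  have hat : ((a.toNat : Nat) : Int) = a := by omega
  have hget : PySem.List.pyGetD f ((a.toNat : Nat) : Int) 0 = f.getD a.toNat 0 := by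
    rw [PySem.List.pyGetD_natCast]
  have hset : PySem.List.pySetD f ((a.toNat : Nat) : Int)
      (PySem.List.pyGetD f ((a.toNat : Nat) : Int) 0 - 1)
      = f.set a.toNat (f.getD a.toNat 0 - 1) := by
    rw [hget, hat, PySem.List.pySetD_of_nonneg f _ ha0]
  rw [hset]
  refine ⟨by simp [hlen], ?_, ?_, (List.pairwise_cons.mp hpw).2,
    fun x hx => hbd x (by simp [hx])⟩
  · intro q hq
    by_cases hqa : q = a.toNat
    · subst hqa
      rw [List.getD_eq_getElem?_getD, List.getElem?_set_self (by omega)]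
      rw [hcnt a.toNat (by omega), hat, List.count_cons_self]
      simp
    · rw [List.getD_eq_getElem?_getD, List.getElem?_set_ne (by omega)]
      rw [← List.getD_eq_getElem?_getD, hcnt q hq]
      have hne : ¬ (a = (q : Int)) := by omega
      rw [List.count_cons]
      simp [hne]
  · intro q hq
    rw [List.getD_eq_getElem?_getD, List.getElem?_set_ne (by omega)]
    rw [← List.getD_eq_getElem?_getD, hcnt q (by omega)]
    rw [count_eq_zero_of_lt_head a (q : Int) s' hpw (by omega)]
    simp

theorem hc_loop (hs : List Int) (s : List Int) (f : List Int) (p : Nat) (r : Int)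
    (hrel : HcRel f p s) (hlen : hs.length = s.length) :
    (hs.foldl (fun (st : List Int × Nat × Int) h =>
      let f := st.1
      let p := hcAdvance f st.2.1
      let r := st.2.2
      if PySem.List.pyGetD f (p : Int) 0 > 0 then
        (PySem.List.pySetD f (p : Int) (PySem.List.pyGetD f (p : Int) 0 - 1), p,
         if h ≠ (p : Int) then r + 1 else r)
      else (f, p, r)) (f, p, r)).2.2
    = r + ((hs.zip s).countP (fun ab => ab.1 != ab.2) : Nat) := by
  induction hs generalizing s f p r with
  | nil => simp
  | cons h hs ih =>
    cases s with
    | nil => simp at hlen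
    | cons a s' =>
      obtain ⟨hl, hcnt, hzero, hpw, hbd⟩ := hrel
      obtain ⟨ha0, ha100⟩ := hbd a (by simp)
      have hat : ((a.toNat : Nat) : Int) = a := by omega
      have hadv : hcAdvance f p = a.toNat := hcAdvance_eq f p a s' ⟨hl, hcnt, hzero, hpw, hbd⟩
      have hget : PySem.List.pyGetD f ((a.toNat : Nat) : Int) 0 = f.getD a.toNat 0 := by
        rw [PySem.List.pyGetD_natCast]
      have hpos : PySem.List.pyGetD f ((a.toNat : Nat) : Int) 0 > 0 := by
        rw [hget, hcnt a.toNat (by omega), hat, List.count_cons_self]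
        positivity
      simp only [List.foldl_cons, hadv, hpos, if_pos]
      rw [ih s' _ a.toNat _ (hcRel_step f p a s' ⟨hl, hcnt, hzero, hpw, hbd⟩) (by simpa using hlen)]
      rw [List.zip_cons_cons, List.countP_cons]
      simp only [hat]
      by_cases hha : h = a
      · simp [hha]
      · have : (h != a) = true := by simpa using hha
        simp [hha, this]
        ring

-- ===== VERDICT (by name: the statement is the Claim_ definition above) =====

theorem heightChecker_count_sort_spec : Claim_equal_heightChecker_count_sort := by
  intro heights _ hpre
  show Spec_heightChecker_count_sort _ _
  unfold Spec_heightChecker_count_sort heightChecker_count_sort heightChecker_count_sort_alt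
  simp only []
  have hlen101 : (heights.foldl
      (fun f h => PySem.List.pySetD f h (PySem.List.pyGetD f h 0 + 1))
      (List.replicate 101 (0 : Int))).length = 101 := by
    rw [hc_build_len]; simp
  set cnt := heights.foldl
      (fun f h => PySem.List.pySetD f h (PySem.List.pyGetD f h 0 + 1))
      (List.replicate 101 (0 : Int)) with hcntdef
  have hrep0 : ∀ q : Nat, (List.replicate 101 (0 : Int)).getD q 0 = 0 := by
    intro q
    rw [List.getD_eq_getElem?_getD, List.getElem?_replicate]
    split <;> simp
  have hcq : ∀ q : Nat, q < 101 →
      cnt.getD q 0 = (heights.countP (fun h => wrapIdx h == q) : Int) := by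
    intro q hq
    rw [hcntdef, hc_build heights (List.replicate 101 (0 : Int)) q hq (by simp) hpre, hrep0, zero_add]
  have hnn : ∀ q : Nat, q < 101 → 0 ≤ cnt.getD q 0 := by
    intro q hq; rw [hcq q hq]; positivity
  rw [expected_eq cnt hnn]
  set E := expList (fun q => (cnt.getD q 0).toNat) (List.range 101) with hEdef
  have hrel : HcRel cnt 0 E := by
    refine ⟨hlen101, ?_, by omega, ?_, ?_⟩
    · intro q hq
      rw [hEdef, count_expList _ _ (List.nodup_range) q (List.mem_range.mpr hq)]
      have := hnn q hq
      omega
    · exact pairwise_expList _ _ ((List.pairwise_lt_range).imp le_of_lt)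
    · intro x hx
      rcases mem_expList _ _ x hx with ⟨p, hp, rfl⟩
      have := List.mem_range.mp hp
      omega
  have hlen : heights.length = E.length := by
    rw [hEdef, length_expList]
    have hmc : (List.range 101).map (fun q => (cnt.getD q 0).toNat)
        = (List.range 101).map (fun q => heights.countP (fun h => wrapIdx h == q)) := by
      apply List.map_congr_left
      intro q hq
      rw [hcq q (List.mem_range.mp hq)]
      omega
    rw [hmc, sum_countP_range heights hpre]
  rw [hc_loop heights E cnt 0 0 hrel hlen]
  simp
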